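-- pv_equiv track=rewrite | github.com/miliar/Code_Jam_Webscraper | solutions_python/Problem_53/475.py | isLightOn
-- ===== SOURCE A (Python) =====
-- def isLightOn(n, k):
-- 	snappers = []
-- 	for i in range(n):
-- 		snappers.append(False)
-- 	for i in range(k):
-- 		end = 0
-- 		while end+1 < len(snappers) and snappers[end] == True:
-- 			end = end + 1
-- 		for j in range(end+1):
-- 			snappers[j] = not snappers[j]
-- 	for snapper in snappers:
-- 		if not snapper:
-- 			return False
-- 	return True
-- ===== SOURCE B (Python) =====
-- def isLightOn(n, k):
--     # Closed form: after k snaps the snappers hold the low n bits of k (LSB first),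
--     # so the light is on iff those n bits are all ones, i.e. 2**n divides k+1.
--     if n <= 0:
--         return True
--     if k < 0 or n > k.bit_length():
--         return False
--     return (k + 1) % (2 ** n) == 0
-- ===== Notes on version B (the rewrite author's own statement) =====
-- stated objective: faster
-- what changed: Replaces the O(k*n) step-by-step snapper simulation with the closed form: the snappers hold the low n bits of k, so the light is on iff 2^n divides k+1 (checked with a bit_length guard in O(1) arithmetic).
import Mathlib
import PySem

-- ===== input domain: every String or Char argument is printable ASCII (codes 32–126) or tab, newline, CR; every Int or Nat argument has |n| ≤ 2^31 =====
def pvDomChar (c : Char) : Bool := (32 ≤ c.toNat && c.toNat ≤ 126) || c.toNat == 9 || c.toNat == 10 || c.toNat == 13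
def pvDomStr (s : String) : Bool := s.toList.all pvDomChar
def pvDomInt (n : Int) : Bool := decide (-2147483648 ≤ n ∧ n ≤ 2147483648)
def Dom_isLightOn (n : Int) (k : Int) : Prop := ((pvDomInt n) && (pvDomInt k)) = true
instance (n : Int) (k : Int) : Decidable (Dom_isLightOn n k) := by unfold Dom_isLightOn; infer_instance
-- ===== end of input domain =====

-- B replaces A's O(k·n) snap-by-snap simulation by the closed form "light on iff 2^n divides k+1"
-- (objective: faster, asymptotic). Where A raises IndexError (n ≤ 0, k ≥ 1) B returns True.


-- ===== PORT A =====

-- the `while end+1 < len(snappers) and snappers[end] == True: end = end + 1` loop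
def findEndA (s : List Bool) (e : Nat) : Nat :=
  if _h : e + 1 < s.length ∧ s.getD e false = true then findEndA s (e + 1) else e
termination_by s.length - e

-- one iteration of the `for i in range(k)` body: find `end`, then flip snappers[0..end]
-- (indices are always in range here, so List.set/getD are exact for snappers[j] = not snappers[j])
def stepA (s : List Bool) : List Bool :=
  (List.range (findEndA s 0 + 1)).foldl (fun t j => t.set j (!(t.getD j false))) s

def isLightOn (n : Int) (k : Int) : Bool :=
  -- snappers = [False]*n built by append; then k snaps; then the all-on check
  ((PySem.List.pyRange 0 k 1).foldl (fun s _ => stepA s)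
      ((PySem.List.pyRange 0 n 1).foldl (fun s _ => s ++ [false]) ([] : List Bool))).all
    (fun b => b)

-- ===== PORT B =====
def isLightOn_alt (n : Int) (k : Int) : Bool :=
  if n ≤ 0 then true
  else if k < 0 || ((PySem.Int.bitLength k : Int) < n) then false
  else decide (PySem.Int.mod (k + 1) (2 ^ n.toNat) = 0)

-- ===== PRECONDITION & SPEC =====
-- Pre_ excludes exactly the inputs where A raises IndexError: n ≤ 0 (empty snapper list) with k ≥ 1.
def Pre_isLightOn (n : Int) (k : Int) : Prop := 1 ≤ n ∨ k ≤ 0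
instance (n : Int) (k : Int) : Decidable (Pre_isLightOn n k) := by unfold Pre_isLightOn; infer_instance

def pvWitness_isLightOn : Int × Int := (3, 7)

def Spec_isLightOn (n : Int) (k : Int) (out : Bool) : Prop := out = isLightOn_alt n k
instance (n : Int) (k : Int) (out : Bool) : Decidable (Spec_isLightOn n k out) := by unfold Spec_isLightOn; infer_instance

-- ===== CLAIM (what is proved, stated in full; the proofs are below) =====
def Claim_equal_isLightOn : Prop := ∀ (n : Int) (k : Int), Dom_isLightOn n k → Pre_isLightOn n k → Spec_isLightOn n k (isLightOn n k)

-- ===== LEMMAS AND PROOFS =====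

-- the value (LSB first) represented by a snapper list
def valB : List Bool → Nat
  | [] => 0
  | b :: t => (cond b 1 0) + 2 * valB t

-- structural form of one snap: flip leading trues, then the first false (wrap when all true)
def incrB : List Bool → List Bool
  | [] => []
  | false :: t => true :: t
  | true :: t => false :: incrB t

theorem valB_lt (s : List Bool) : valB s < 2 ^ s.length := by
  induction s with
  | nil => simp [valB]
  | cons b t ih => cases b <;> simp [valB, pow_succ] <;> omega

theorem length_incrB (s : List Bool) : (incrB s).length = s.length := by
  induction s with
  | nil => rfl
  | cons b t ih => cases b <;> simp [incrB, ih]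

theorem valB_incrB (s : List Bool) : valB (incrB s) = (valB s + 1) % 2 ^ s.length := by
  induction s with
  | nil => rfl
  | cons b t ih =>
    cases b with
    | false =>
      have := valB_lt t
      simp [incrB, valB, pow_succ]
      rw [Nat.mod_eq_of_lt (by omega)]
      omega
    | true =>
      simp [incrB, valB, ih, pow_succ]
      rw [mul_comm (2 ^ t.length) 2, ← Nat.mul_mod_mul_left]
      ring_nf

theorem findEndA_shift (t : List Bool) (b : Bool) (e : Nat) :
    findEndA (b :: t) (e + 1) = findEndA t e + 1 := by
  fun_induction findEndA t e with
  | case1 e hcond ih =>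
    rw [findEndA, dif_pos (show e + 1 + 1 < (b :: t).length ∧ (b :: t).getD (e + 1) false = true by
      exact ⟨by simp; omega, by simpa using hcond.2⟩)]
    exact ih
  | case2 e hcond =>
    rw [findEndA, dif_neg]
    intro hc
    exact hcond ⟨by simpa using hc.1, by simpa using hc.2⟩

-- the flip-prefix fold acts on a cons by flipping the head then working in the tail
theorem flipFold_map_succ (l : List Nat) (c : Bool) (t : List Bool) :
    (l.map Nat.succ).foldl (fun u j => u.set j (!(u.getD j false))) (c :: t)
      = c :: l.foldl (fun u j => u.set j (!(u.getD j false))) t := by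
  induction l generalizing t with
  | nil => rfl
  | cons j l ih =>
    simp only [List.map_cons, List.foldl_cons, List.getD_cons_succ, List.set_cons_succ]
    exact ih _

theorem stepA_eq_incrB (s : List Bool) : stepA s = incrB s := by
  induction s with
  | nil =>
    show stepA [] = []
    unfold stepA
    rw [findEndA, dif_neg (by simp)]
    simp
  | cons b t ih =>
    cases b with
    | false =>
      show stepA (false :: t) = true :: t
      unfold stepA
      rw [findEndA, dif_neg (by simp)]
      simp
    | true =>
      cases t with
      | nil =>
        show stepA [true] = [false]
        unfold stepA
        rw [findEndA, dif_neg (by simp)]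
        simp
      | cons c r =>
        show stepA (true :: c :: r) = false :: incrB (c :: r)
        unfold stepA
        rw [findEndA, dif_pos (by simp)]
        rw [findEndA_shift (c :: r) true 0]
        rw [List.range_succ_eq_map]
        simp only [List.foldl_cons]
        have h0 : (true :: c :: r).set 0 (!((true :: c :: r).getD 0 false)) = false :: c :: r := by
          simp
        rw [h0, flipFold_map_succ]
        rw [← ih]
        rfl

theorem length_stepA (s : List Bool) : (stepA s).length = s.length := by
  rw [stepA_eq_incrB]; exact length_incrB s

-- iterating the snap m times adds m modulo 2^length
theorem valB_iter (m : Nat) (s : List Bool) :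
    valB (stepA^[m] s) = (valB s + m) % 2 ^ s.length ∧ (stepA^[m] s).length = s.length := by
  induction m generalizing s with
  | zero => exact ⟨(Nat.mod_eq_of_lt (valB_lt s)).symm, rfl⟩
  | succ m ih =>
    rw [Function.iterate_succ_apply]
    obtain ⟨hv, hl⟩ := ih (stepA s)
    constructor
    · rw [hv, length_stepA, stepA_eq_incrB, valB_incrB, Nat.mod_add_mod]
      congr 1
      omega
    · rw [hl, length_stepA]

theorem all_iff_valB (s : List Bool) : (s.all (fun b => b) = true) ↔ valB s = 2 ^ s.length - 1 := by
  induction s with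
  | nil => simp [valB]
  | cons b t ih =>
    have := valB_lt t
    cases b <;> simp [valB, pow_succ, ih] <;> omega

theorem foldl_const_iterate (l : List Int) (s : List Bool) :
    l.foldl (fun t _ => stepA t) s = stepA^[l.length] s := by
  induction l generalizing s with
  | nil => rfl
  | cons x l ih => simp [List.foldl_cons, ih, Function.iterate_succ_apply]

theorem build_replicate (l : List Int) (acc : List Bool) :
    l.foldl (fun s _ => s ++ [false]) acc = acc ++ List.replicate l.length false := by
  induction l generalizing acc with
  | nil => simp
  | cons x l ih => rw [List.foldl_cons, ih, List.append_assoc]; rfl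

theorem valB_replicate (m : Nat) : valB (List.replicate m false) = 0 := by
  induction m with
  | zero => rfl
  | succ m ih => simp [List.replicate_succ, valB, ih]

theorem succ_mod_eq_zero_iff (p K : Nat) (hp : 0 < p) :
    K % p = p - 1 ↔ (K + 1) % p = 0 := by
  constructor
  · intro h
    rw [← Nat.mod_add_mod, h, Nat.sub_add_cancel hp, Nat.mod_self]
  · intro h
    have hK := Nat.mod_lt K hp
    by_contra hne
    have hlt : K % p + 1 < p := by omega
    rw [← Nat.mod_add_mod, Nat.mod_eq_of_lt hlt] at h
    omega

-- ===== VERDICT (by name: the statement is the Claim_ definition above) =====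
theorem isLightOn_spec : Claim_equal_isLightOn := by
  unfold Claim_equal_isLightOn
  intro n k _ hpre
  unfold Spec_isLightOn isLightOn isLightOn_alt
  by_cases hn : n ≤ 0
  · have hk : k ≤ 0 := by rcases hpre with h | h; omega; exact h
    rw [PySem.List.pyRange_one_eq_nil hn, PySem.List.pyRange_one_eq_nil hk]
    simp [hn]
  · push Not at hn
    rw [if_neg (by omega)]
    rw [build_replicate, foldl_const_iterate]
    simp only [List.nil_append, PySem.List.length_pyRange_one, Int.sub_zero]
    set N := n.toNat with hN
    set K := k.toNat with hK
    have hN1 : 1 ≤ N := by omega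
    have hiter := valB_iter K (List.replicate N false)
    have hAiff := all_iff_valB (stepA^[K] (List.replicate N false))
    rw [hiter.2, List.length_replicate, hiter.1, valB_replicate, List.length_replicate,
      Nat.zero_add] at hAiff
    have hA : (stepA^[K] (List.replicate N false)).all (fun b => b)
        = decide (K % 2 ^ N = 2 ^ N - 1) := by
      rw [Bool.eq_iff_iff, decide_eq_true_iff]
      exact hAiff
    rw [hA]
    have hpow : (1 : Nat) ≤ 2 ^ (N - 1) := Nat.one_le_two_pow
    have hpows : 2 ^ N = 2 * 2 ^ (N - 1) := by
      conv_lhs => rw [show N = (N - 1) + 1 by omega]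
      rw [pow_succ]; ring
    by_cases hk : k < 0
    · rw [if_pos (by simp [hk])]
      have : K = 0 := by omega
      rw [this]
      simp only [Nat.zero_mod, decide_eq_false_iff_not]
      omega
    · push Not at hk
      by_cases hbl : (PySem.Int.bitLength k : Int) < n
      · rw [if_pos (by simp [hbl])]
        have hlt := PySem.Int.lt_two_pow_bitLength k
        have habs : k.natAbs = K := by omega
        have hble : PySem.Int.bitLength k ≤ N - 1 := by omega
        have : K < 2 ^ (N - 1) :=
          lt_of_lt_of_le (habs ▸ hlt) (Nat.pow_le_pow_right (by norm_num) hble)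
        simp only [decide_eq_false_iff_not]
        rw [Nat.mod_eq_of_lt (by omega)]
        omega
      · rw [if_neg (by simp at hbl ⊢; omega)]
        rw [PySem.Int.mod_eq_emod_of_pos (by positivity)]
        rw [decide_eq_decide]
        rw [succ_mod_eq_zero_iff _ _ (by positivity)]
        have hkK : k = (K : Int) := by omega
        rw [hkK]
        exact_mod_cast Iff.rfl
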